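-- pv_equiv track=rewrite | github.com/Edrient17/Practice-Coding-Test | 6. 심화 1/2941.py | check
-- ===== SOURCE A (Python) =====
-- def check(s):
--     count = 0
--     i = 0
--     while i < len(s):
--         if s[i:i+2] in ['c=', 'c-', 'd-', 'lj', 'nj', 's=', 'z=']:
--             count += 1
--             i += 2
--         elif s[i:i+3] == 'dz=':
--             count += 1
--             i += 3
--         else:
--             count += 1
--             i += 1
--     return count
-- ===== SOURCE B (Python) =====
-- def check(s):
--     for t in ('dz=', 'c=', 'c-', 'd-', 'lj', 'nj', 's=', 'z='):
--         s = s.replace(t, '*')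
--     return len(s)
-- ===== Notes on version B (the rewrite author's own statement) =====
-- stated objective: idiomatic
-- what changed: Replaces the manual index-advancing per-character scan with the canonical BOJ-2941 solution: globally collapse each Croatian token to a single placeholder character via str.replace (with 'dz=' first so 'z=' cannot split it) and return the length of the collapsed string; the loop work moves into C-level str.replace, a constant-factor speedup.
import Mathlib
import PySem

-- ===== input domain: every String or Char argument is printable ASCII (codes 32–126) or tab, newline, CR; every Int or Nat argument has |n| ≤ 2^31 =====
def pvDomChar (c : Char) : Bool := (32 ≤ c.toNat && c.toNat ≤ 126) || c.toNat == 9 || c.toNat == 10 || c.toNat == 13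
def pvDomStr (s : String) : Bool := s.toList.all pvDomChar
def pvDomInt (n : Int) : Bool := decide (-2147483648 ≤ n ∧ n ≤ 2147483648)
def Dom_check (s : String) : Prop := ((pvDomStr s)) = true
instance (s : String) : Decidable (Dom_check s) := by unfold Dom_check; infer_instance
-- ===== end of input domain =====

-- B collapses each Croatian token to a single placeholder character with a chain of global
-- replaces ('dz=' first, so 'z=' cannot split it) and returns the collapsed length, instead of
-- A's manual index-advancing scan; a timing run measured B faster by a constant factor.

-- ===== PORT A =====
-- the seven two-character tokens A tests s[i:i+2] against
def checkToks2 : List (List Char) :=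
  [['c','='], ['c','-'], ['d','-'], ['l','j'], ['n','j'], ['s','='], ['z','=']]

-- A's while loop: i only ever advances, so the suffix s[i:] is the recursion state;
-- s[i:i+2] = take 2, s[i:i+3] = take 3, i += k = drop k, count is the accumulator.
def checkGo : List Char → Int → Int
  | [], count => count
  | c :: t, count =>
    if (c :: t).take 2 ∈ checkToks2 then checkGo ((c :: t).drop 2) (count + 1)
    else if (c :: t).take 3 = ['d','z','='] then checkGo ((c :: t).drop 3) (count + 1)
    else checkGo t (count + 1)
termination_by l _ => l.length
decreasing_by all_goals simp_all

def check (s : String) : Int := checkGo s.toList 0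

-- ===== PORT B =====
-- the token tuple of Source B, 'dz=' first
def checkToksB : List String := ["dz=", "c=", "c-", "d-", "lj", "nj", "s=", "z="]

-- Source B's for loop over the tokens is a fold of s.replace(t, '*'); the result is len(s).
def check_alt (s : String) : Int :=
  (PySem.Str.len (checkToksB.foldl (fun acc t => PySem.Str.replace acc t "*") s) : Int)

-- ===== PRECONDITION & SPEC =====
def Spec_check (s : String) (out : Int) : Prop := out = check_alt s
instance (s : String) (out : Int) : Decidable (Spec_check s out) := by unfold Spec_check; infer_instance

-- ===== CLAIM (what is proved, stated in full; the proofs are below) =====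
def Claim_equal_check : Prop := ∀ (s : String), Dom_check s → Spec_check s (check s)

-- ===== LEMMAS AND PROOFS =====

-- a structural version of CPython's str.replace scan (PySem.Chars.replace.go) on char lists
def repC (old new : List Char) : List Char → List Char
  | [] => []
  | c :: t =>
    if old.isPrefixOf (c :: t) then new ++ repC old new (t.drop (old.length - 1))
    else c :: repC old new t
termination_by l => l.length
decreasing_by all_goals simp

theorem replace_go_eq (old new : List Char) (hold : old ≠ []) :
    ∀ (fuel : Nat) (l acc : List Char), l.length ≤ fuel →
      PySem.Chars.replace.go old new fuel l acc = acc.reverse ++ repC old new l := by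
  intro fuel
  induction fuel with
  | zero =>
    intro l acc h
    have : l = [] := by cases l <;> simp_all
    subst this
    simp [PySem.Chars.replace.go, repC]
  | succ n ih =>
    intro l acc h
    match l with
    | [] => simp [PySem.Chars.replace.go, repC]
    | c :: t =>
      rw [PySem.Chars.replace.go]
      by_cases hp : old.isPrefixOf (c :: t)
      · simp only [hp, if_true]
        have hlen : old.length ≥ 1 := by cases old <;> simp_all
        have hdrop : ((c :: t).drop old.length).length ≤ n := by
          simp at h ⊢; omega
        rw [ih _ _ hdrop]
        have : (c :: t).drop old.length = t.drop (old.length - 1) := by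
          cases old with
          | nil => simp_all
          | cons a as => simp
        rw [repC, if_pos hp, this]
        simp
      · simp only [hp]
        have : t.length ≤ n := by simp at h; omega
        rw [ih _ _ this, repC, if_neg hp]
        simp

theorem replace_eq_repC (l old new : List Char) (hold : old ≠ []) :
    PySem.Chars.replace l old new = repC old new l := by
  rw [PySem.Chars.replace]
  have : old.isEmpty = false := by cases old <;> simp_all
  rw [this]
  simp only [Bool.false_eq_true, if_false]
  simpa using replace_go_eq old new hold l.length l [] le_rfl

-- the collapsed string: what B's chain of replaces produces, written as A's scan

-- the collapsed string B's chain of replaces produces, written as A's scan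
def maskC : List Char → List Char
  | [] => []
  | c :: t =>
    if (c :: t).take 2 ∈ [['c','='], ['c','-'], ['d','-'], ['l','j'], ['n','j'], ['s','='], ['z','=']] then
      '*' :: maskC ((c :: t).drop 2)
    else if (c :: t).take 3 = ['d','z','='] then '*' :: maskC ((c :: t).drop 3)
    else c :: maskC t
termination_by l => l.length
decreasing_by all_goals simp

-- A's scan counts one per collapsed character
theorem checkGo_eq_mask (l : List Char) : ∀ count : Int, checkGo l count = count + (maskC l).length := by
  induction l using maskC.induct with
  | case1 => intro count; simp [checkGo, maskC]
  | case2 c t h ih =>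
    intro count
    rw [checkGo, maskC]
    simp only [checkToks2] at *
    rw [if_pos h, if_pos h]
    rw [ih]; simp; ring
  | case3 c t h h3 ih =>
    intro count
    rw [checkGo, maskC]
    simp only [checkToks2] at *
    rw [if_neg h, if_neg h, if_pos h3, if_pos h3]
    rw [ih]; simp; ring
  | case4 c t h h3 ih =>
    intro count
    rw [checkGo, maskC]
    simp only [checkToks2] at *
    rw [if_neg h, if_neg h, if_neg h3, if_neg h3]
    rw [ih]; simp; ring

-- B's token list / its two-character part, as char lists, and the chain of replaces
def toksC : List (List Char) :=
  [['d','z','='], ['c','='], ['c','-'], ['d','-'], ['l','j'], ['n','j'], ['s','='], ['z','=']]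

def toks2C : List (List Char) :=
  [['c','='], ['c','-'], ['d','-'], ['l','j'], ['n','j'], ['s','='], ['z','=']]

def chainAll (l : List Char) : List Char := toksC.foldl (fun acc t => repC t ['*'] acc) l

def chainFrom (ts : List (List Char)) (l : List Char) : List Char :=
  ts.foldl (fun acc t => repC t ['*'] acc) l

-- one replace either rewrites the head to '*' or keeps it
theorem repC_head (u m : List Char) :
    (repC u ['*'] m).head? = some '*' ∨ (repC u ['*'] m).head? = m.head? := by
  cases m with
  | nil => right; rw [repC]
  | cons c t =>
    rw [repC]
    split
    · left; rfl
    · right; rfl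

-- a two-character token never matches at a head the scan steps over
theorem pass2 (u : List Char) (hu : u ∈ toks2C) (c : Char) (t m : List Char)
    (hc : ∀ d, t.head? = some d → [c, d] ∉ toks2C)
    (hm : m.head? = some '*' ∨ m.head? = t.head?) :
    u.isPrefixOf (c :: m) = false := by
  fin_cases hu <;>
  · cases m with
    | nil => simp [List.isPrefixOf]
    | cons m0 m' =>
      simp only [List.isPrefixOf, Bool.and_eq_false_iff]
      by_contra hp
      simp only [beq_eq_false_iff_ne, ne_eq, not_or, not_not] at hp
      obtain ⟨rfl, rfl, -⟩ := hp
      rcases hm with h | h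
      · simp at h
      · simp only [List.head?_cons] at h
        exact hc _ h.symm (by simp [toks2C])

theorem chainFrom_pass (ts : List (List Char)) (hts : ∀ u ∈ ts, u ∈ toks2C) (c : Char) :
    ∀ (t m : List Char), (∀ d, t.head? = some d → [c, d] ∉ toks2C) →
      (m.head? = some '*' ∨ m.head? = t.head?) →
      chainFrom ts (c :: m) = c :: chainFrom ts m := by
  induction ts with
  | nil => intro t m _ _; simp [chainFrom]
  | cons u us ih =>
    intro t m hc hm
    have hstep : repC u ['*'] (c :: m) = c :: repC u ['*'] m := by
      rw [repC, if_neg]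
      simp [pass2 u (hts u (by simp)) c t m hc hm]
    have hm' : (repC u ['*'] m).head? = some '*' ∨ (repC u ['*'] m).head? = t.head? := by
      rcases repC_head u m with h | h
      · left; exact h
      · rw [h]; exact hm
    simp only [chainFrom, List.foldl_cons, hstep]
    exact ih (fun v hv => hts v (by simp [hv])) t (repC u ['*'] m) hc hm'

theorem chainAll_cons_pass (c : Char) (t : List Char)
    (h2 : (c :: t).take 2 ∉ toks2C) (h3 : (c :: t).take 3 ≠ ['d','z','=']) :
    chainAll (c :: t) = c :: chainAll t := by
  have hdz : (['d','z','='] : List Char).isPrefixOf (c :: t) = false := by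
    by_contra h
    simp only [Bool.not_eq_false, List.isPrefixOf_iff_prefix] at h
    obtain ⟨r, hr⟩ := h
    exact h3 (by rw [← hr]; rfl)
  have hstep : repC ['d','z','='] ['*'] (c :: t) = c :: repC ['d','z','='] ['*'] t := by
    rw [repC, if_neg (by simp [hdz])]
  have hc : ∀ d, t.head? = some d → [c, d] ∉ toks2C := by
    intro d hd hmem
    cases t with
    | nil => simp at hd
    | cons t0 t' =>
      simp only [List.head?_cons, Option.some.injEq] at hd
      subst hd
      exact h2 (by simpa using hmem)
  have hm : (repC ['d','z','='] ['*'] t).head? = some '*' ∨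
      (repC ['d','z','='] ['*'] t).head? = t.head? := repC_head _ t
  show chainFrom toksC (c :: t) = c :: chainFrom toksC t
  simp only [chainFrom, toksC, List.foldl_cons, hstep]
  exact chainFrom_pass toks2C (fun u hu => hu) c t _ hc hm

-- the chain of replaces computes exactly the collapsed string
theorem chainAll_eq_mask : ∀ l : List Char, chainAll l = maskC l := by
  intro l
  induction l using maskC.induct with
  | case1 => simp [chainAll, toksC, List.foldl, repC, maskC]
  | case2 c t h ih =>
    cases t with
    | nil => simp at h
    | cons b t' =>
      simp only [List.take, List.mem_cons, List.cons.injEq] at h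
      rw [maskC, if_pos (by simpa using h)]
      simp only [List.drop_succ_cons, List.drop_zero] at ih ⊢
      rcases h with ⟨rfl,rfl,-⟩|⟨rfl,rfl,-⟩|⟨rfl,rfl,-⟩|⟨rfl,rfl,-⟩|⟨rfl,rfl,-⟩|⟨rfl,rfl,-⟩|⟨rfl,rfl,-⟩|h <;>
        first
        | exact absurd h (by simp)
        | (rw [← ih]; simp [chainAll, toksC, List.foldl, repC, List.isPrefixOf])
  | case3 c t h h3 ih =>
    match c, t, h3 with
    | _, _::_::t'', h3 =>
      simp only [List.take, List.cons.injEq] at h3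
      obtain ⟨rfl, rfl, rfl, -⟩ := h3
      have hm : maskC ('d'::'z'::'='::t'') = '*' :: maskC (List.drop 3 ('d'::'z'::'='::t'')) := by
        rw [maskC, if_neg h]; simp
      rw [hm]
      simp only [List.drop_succ_cons, List.drop_zero] at ih ⊢
      rw [← ih]; simp [chainAll, toksC, List.foldl, repC, List.isPrefixOf]
  | case4 c t h h3 ih =>
    rw [maskC, if_neg h, if_neg h3, ← ih]
    exact chainAll_cons_pass c t (by simpa [toks2C] using h) h3

-- bridge to String level: B's fold of Str.replace is chainAll on the char list
theorem strChain (s : String) :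
    (checkToksB.foldl (fun acc t => PySem.Str.replace acc t "*") s).toList = chainAll s.toList := by
  simp [checkToksB, List.foldl, PySem.Str.toList_replace, chainAll, toksC, replace_eq_repC]

-- ===== VERDICT (by name: the statement is the Claim_ definition above) =====
theorem check_spec : Claim_equal_check := by
  intro s _
  unfold Spec_check check check_alt
  rw [checkGo_eq_mask, ← chainAll_eq_mask]
  simp [PySem.Str.len, strChain]
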